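-- pv_equiv track=rewrite | github.com/jdverbek/agentflow-backend | src/orchestration/real_manager_agent.py | _extract_slides
-- ===== SOURCE A (Python) =====
-- from typing import Dict, List, Any, Optional
--
-- def _extract_slides(content: str) -> List[Dict[str, str]]:
--     """Extract slide structure from content"""
--     # Simple extraction - in production, use more sophisticated parsing
--     slides = []
--     lines = content.split('\n')
--     current_title = ""
--     current_narrative = ""
--
--     for line in lines:
--         line = line.strip()
--         if line and (line.startswith('#') or line.isupper() or 'slide' in line.lower()):
--             if current_title:
--                 slides.append({'title': current_title, 'narrative': current_narrative})
--             current_title = line.replace('#', '').strip()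
--             current_narrative = ""
--         elif line:
--             current_narrative += line + " "
--
--     if current_title:
--         slides.append({'title': current_title, 'narrative': current_narrative})
--
--     return slides[:5]  # Top 5 slides
-- ===== SOURCE B (Python) =====
-- def _is_title(line):
--     return line.startswith('#') or line.isupper() or 'slide' in line.lower()
--
--
-- def _parse(lines):
--     """Recursive segment parser: skip to the first title line, collect the
--     narrative segment up to the next title, emit the slide if its cleaned
--     title is non-empty, and recurse on the remainder."""
--     rest = lines
--     while rest and not _is_title(rest[0]):
--         rest = rest[1:]
--     if not rest:
--         return []
--     head = rest[0]
--     tail = rest[1:]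
--     body = []
--     while tail and not _is_title(tail[0]):
--         body.append(tail[0])
--         tail = tail[1:]
--     title = head.replace('#', '').strip()
--     slide = ([{'title': title, 'narrative': ''.join(l + ' ' for l in body)}]
--              if title else [])
--     return slide + _parse(tail)
--
--
-- def _extract_slides(content):
--     """Extract slide structure from content (staged: clean lines, then
--     recursively split into title-delimited segments)."""
--     lines = [l for l in (r.strip() for r in content.split('\n')) if l]
--     return _parse(lines)[:5]
-- ===== Notes on version B (the rewrite author's own statement) =====
-- stated objective: alternative
-- what changed: B replaces A's single-pass fold with current_title/current_narrative flush state by a staged pipeline: first strip and drop empty lines, then a recursive segment parser that skips to the next title line, collects the narrative segment up to the following title, emits the slide if the cleaned title is non-empty, and recurses on the remainder.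
import Mathlib
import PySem

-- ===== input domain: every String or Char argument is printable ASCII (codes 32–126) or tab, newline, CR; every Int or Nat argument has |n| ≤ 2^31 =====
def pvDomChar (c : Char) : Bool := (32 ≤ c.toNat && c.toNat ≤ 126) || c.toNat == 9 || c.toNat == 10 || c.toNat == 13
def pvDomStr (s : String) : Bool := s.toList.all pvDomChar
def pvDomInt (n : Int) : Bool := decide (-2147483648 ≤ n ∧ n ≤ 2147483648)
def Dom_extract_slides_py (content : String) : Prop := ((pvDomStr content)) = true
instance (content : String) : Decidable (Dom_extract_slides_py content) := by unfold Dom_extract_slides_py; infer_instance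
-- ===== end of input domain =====

-- B replaces A's single-pass accumulator loop by a staged recursive segment parser:
-- clean the lines first, then recursively split them at title lines (objective: alternative, same cost).

-- line.isupper(): hand-ported, exact on the ASCII domain (there the cased characters are exactly a-z/A-Z):
-- at least one uppercase character and no lowercase character.
def pvIsupper (s : String) : Bool :=
  s.toList.any PySem.Chars.isupper && s.toList.all (fun c => !(PySem.Chars.islower c))

-- the shared title test 'line.startswith('#') or line.isupper() or 'slide' in line.lower()'
-- (the identical expression occurs verbatim in both Python sources)
def pvIsTitle (line : String) : Bool :=
  PySem.Str.startswith line "#" || pvIsupper line || PySem.Str.isIn "slide" (PySem.Str.lower line)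

-- ===== PORT A =====
-- loop body of A: state = (slides, current_title, current_narrative)
def pvStepA (st : List (List (String × String)) × String × String) (raw : String) :
    List (List (String × String)) × String × String :=
  let line := PySem.Str.strip raw
  if line ≠ "" ∧ pvIsTitle line = true then
    ((if st.2.1 ≠ "" then st.1 ++ [[("title", st.2.1), ("narrative", st.2.2)]] else st.1),
     PySem.Str.strip (PySem.Str.replace line "#" ""), "")
  else if line ≠ "" then (st.1, st.2.1, st.2.2 ++ line ++ " ")
  else st

def extract_slides_py (content : String) : List (List (String × String)) :=
  let st := (((PySem.Str.split? content "\n").getD [])).foldl pvStepA ([], "", "")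
  PySem.List.slice
    (if st.2.1 ≠ "" then st.1 ++ [[("title", st.2.1), ("narrative", st.2.2)]] else st.1)
    none (some 5)

-- ===== PORT B =====
def pvNotTitle (l : String) : Bool := !pvIsTitle l

-- B's recursive segment parser: skip to the first title line, take the narrative
-- segment up to the next title (the two while loops = dropWhile / takeWhile+dropWhile),
-- emit the slide if the cleaned title is non-empty, recurse on the remainder.
def pvParse (ls : List String) : List (List (String × String)) :=
  match h : ls.dropWhile pvNotTitle with
  | [] => []
  | t :: rest =>
    let body := rest.takeWhile pvNotTitle
    let tail := rest.dropWhile pvNotTitle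
    let title := PySem.Str.strip (PySem.Str.replace t "#" "")
    (if title ≠ "" then
       [[("title", title), ("narrative", body.foldl (fun a l => a ++ l ++ " ") "")]]
     else []) ++ pvParse tail
termination_by ls.length
decreasing_by
  calc (rest.dropWhile pvNotTitle).length ≤ rest.length := List.length_dropWhile_le _ _
    _ < (t :: rest).length := Nat.lt_succ_self _
    _ ≤ ls.length := h ▸ List.length_dropWhile_le _ _

def extract_slides_py_alt (content : String) : List (List (String × String)) :=
  let lines := ((((PySem.Str.split? content "\n").getD []).map PySem.Str.strip).filter
      (fun l => l ≠ ""))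
  PySem.List.slice (pvParse lines) none (some 5)

-- ===== PRECONDITION & SPEC =====
def Spec_extract_slides_py (content : String) (out : List (List (String × String))) : Prop := out = extract_slides_py_alt content
instance (content : String) (out : List (List (String × String))) : Decidable (Spec_extract_slides_py content out) := by unfold Spec_extract_slides_py; infer_instance

-- ===== CLAIM (what is proved, stated in full; the proofs are below) =====
def Claim_equal_extract_slides_py : Prop := ∀ (content : String), Dom_extract_slides_py content → Spec_extract_slides_py content (extract_slides_py content)

-- ===== LEMMAS AND PROOFS =====

-- A's step on an already-stripped non-empty line
def pvStepA' (st : List (List (String × String)) × String × String) (line : String) :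
    List (List (String × String)) × String × String :=
  if pvIsTitle line then
    ((if st.2.1 ≠ "" then st.1 ++ [[("title", st.2.1), ("narrative", st.2.2)]] else st.1),
     PySem.Str.strip (PySem.Str.replace line "#" ""), "")
  else (st.1, st.2.1, st.2.2 ++ line ++ " ")

-- commit the pending slide (A's epilogue)
def pvFinal (st : List (List (String × String)) × String × String) :
    List (List (String × String)) :=
  if st.2.1 ≠ "" then st.1 ++ [[("title", st.2.1), ("narrative", st.2.2)]] else st.1

-- what the remaining (clean) lines contribute, given the pending slide (t, n)
def pvRest (t n : String) (L : List String) : List (List (String × String)) :=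
  if t ≠ "" then
    [[("title", t), ("narrative", (L.takeWhile pvNotTitle).foldl (fun a l => a ++ l ++ " ") n)]]
      ++ pvParse (L.dropWhile pvNotTitle)
  else pvParse L

lemma pv_dw {α : Type} (p : α → Bool) (l : List α) :
    (l.dropWhile p).dropWhile p = l.dropWhile p := by
  induction l with
  | nil => rfl
  | cons a l ih =>
      rw [List.dropWhile_cons]
      by_cases h : p a = true
      · simpa [h] using ih
      · simp [h, List.dropWhile_cons]

lemma pv_dw_prefix {α : Type} (p : α → Bool) {l l' : List α} (h : l.dropWhile p = l)
    (hp : l' <+: l) : l'.dropWhile p = l' := by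
  cases l' with
  | nil => rfl
  | cons a t =>
      obtain ⟨u, hu⟩ := hp
      obtain ⟨r, rfl⟩ : ∃ r, l = a :: r := ⟨t ++ u, by simpa using hu.symm⟩
      have ha : p a = false := by
        by_contra hpa
        have hpa' : p a = true := by simpa using hpa
        rw [List.dropWhile_cons, if_pos hpa'] at h
        have h1 := List.length_dropWhile_le p r
        have h2 := congrArg List.length h
        simp at h2; omega
      simp [List.dropWhile_cons, ha]

lemma pv_strip_idem (cs : List Char) :
    PySem.Chars.strip (PySem.Chars.strip cs) = PySem.Chars.strip cs := by
  unfold PySem.Chars.strip PySem.Chars.rstrip PySem.Chars.lstrip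
  have h1 : (cs.dropWhile PySem.Chars.isspace).dropWhile PySem.Chars.isspace
      = cs.dropWhile PySem.Chars.isspace := pv_dw _ _
  have hpre : (((cs.dropWhile PySem.Chars.isspace).reverse.dropWhile
        PySem.Chars.isspace).reverse) <+: cs.dropWhile PySem.Chars.isspace := by
    have hs := List.dropWhile_suffix (l := (cs.dropWhile PySem.Chars.isspace).reverse)
      (p := PySem.Chars.isspace)
    simpa using hs.reverse
  rw [pv_dw_prefix _ h1 hpre]
  simp [pv_dw]

lemma pv_strip_strip (s : String) :
    PySem.Str.strip (PySem.Str.strip s) = PySem.Str.strip s := by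
  simp [PySem.Str.strip, pv_strip_idem]

lemma pv_fold_clean (raws : List String) (st : _ × String × String) :
    raws.foldl pvStepA st
      = ((raws.map PySem.Str.strip).filter (fun l => l ≠ "")).foldl pvStepA' st := by
  induction raws generalizing st with
  | nil => rfl
  | cons r raws ih =>
      by_cases h : PySem.Str.strip r = ""
      · simp only [List.foldl_cons, List.map_cons, List.filter_cons, h]
        rw [show pvStepA st r = st by simp [pvStepA, h]]
        simpa using ih st
      · simp only [List.foldl_cons, List.map_cons, List.filter_cons, h]
        rw [show pvStepA st r = pvStepA' st (PySem.Str.strip r) by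
          by_cases ht : pvIsTitle (PySem.Str.strip r) = true <;>
            simp [pvStepA, pvStepA', h, ht, pv_strip_strip]]
        simpa [h] using ih _

lemma pvParse_dropWhile (L : List String) :
    pvParse (L.dropWhile pvNotTitle) = pvParse L := by
  rw [pvParse, pvParse, pv_dw]

lemma pvParse_cons_title (x : String) (L : List String) (hx : pvIsTitle x = true) :
    pvParse (x :: L) =
      (if PySem.Str.strip (PySem.Str.replace x "#" "") ≠ "" then
        [[("title", PySem.Str.strip (PySem.Str.replace x "#" "")),
          ("narrative", (L.takeWhile pvNotTitle).foldl (fun a l => a ++ l ++ " ") "")]]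
       else []) ++ pvParse (L.dropWhile pvNotTitle) := by
  rw [pvParse]
  rw [show (x :: L).dropWhile pvNotTitle = x :: L by
    simp [List.dropWhile_cons, pvNotTitle, hx]]

-- main invariant: running A's clean-line fold and committing = already-built ++ B's parse of the rest
lemma pv_invariant (L : List String) (s : List (List (String × String))) (t n : String) :
    pvFinal (L.foldl pvStepA' (s, t, n)) = s ++ pvRest t n L := by
  induction L generalizing s t n with
  | nil =>
      by_cases ht : t = "" <;> simp [pvFinal, pvRest, pvParse, ht]
  | cons x L ih =>
      by_cases hx : pvIsTitle x = true
      · rw [List.foldl_cons, show pvStepA' (s, t, n) x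
            = ((if t ≠ "" then s ++ [[("title", t), ("narrative", n)]] else s),
               PySem.Str.strip (PySem.Str.replace x "#" ""), "") by
              simp [pvStepA', hx], ih]
        by_cases ht : t = ""
        · rw [show pvRest t n (x :: L) = pvParse (x :: L) by simp [pvRest, ht],
            pvParse_cons_title x L hx]
          by_cases h2 : PySem.Str.strip (PySem.Str.replace x "#" "") = "" <;>
            simp [pvRest, h2, ht, pvParse_dropWhile]
        · have htw : (x :: L).takeWhile pvNotTitle = [] := by
            simp [List.takeWhile_cons, pvNotTitle, hx]
          have hdw : (x :: L).dropWhile pvNotTitle = x :: L := by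
            simp [List.dropWhile_cons, pvNotTitle, hx]
          rw [show pvRest t n (x :: L)
              = [[("title", t), ("narrative", n)]] ++ pvParse (x :: L) by
            simp [pvRest, ht, htw, hdw]]
          rw [pvParse_cons_title x L hx]
          by_cases h2 : PySem.Str.strip (PySem.Str.replace x "#" "") = "" <;>
            simp [pvRest, h2, ht, pvParse_dropWhile]
      · rw [List.foldl_cons, show pvStepA' (s, t, n) x = (s, t, n ++ x ++ " ") by
          simp [pvStepA', hx], ih]
        by_cases ht : t = ""
        · have : pvParse (x :: L) = pvParse L := by
            rw [pvParse, pvParse]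
            rw [show (x :: L).dropWhile pvNotTitle = L.dropWhile pvNotTitle by
              simp [List.dropWhile_cons, pvNotTitle, hx]]
          simp [pvRest, ht, this]
        · have htw : (x :: L).takeWhile pvNotTitle = x :: L.takeWhile pvNotTitle := by
            simp [List.takeWhile_cons, pvNotTitle, hx]
          have hdw : (x :: L).dropWhile pvNotTitle = L.dropWhile pvNotTitle := by
            simp [List.dropWhile_cons, pvNotTitle, hx]
          simp [pvRest, ht, htw, hdw]

-- ===== VERDICT (by name: the statement is the Claim_ definition above) =====
theorem extract_slides_py_spec : Claim_equal_extract_slides_py := by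
  intro content _
  unfold Spec_extract_slides_py extract_slides_py extract_slides_py_alt
  dsimp only
  rw [pv_fold_clean]
  have h := pv_invariant ((((PySem.Str.split? content "\n").getD []).map
      PySem.Str.strip).filter (fun l => l ≠ "")) [] "" ""
  simp only [pvRest, ne_eq, not_true_eq_false, if_false, List.nil_append] at h
  rw [← h]
  rfl
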